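-- pv_equiv track=rewrite | github.com/ConanMp/Metabolism_map_prediction_pipeline | calculate_probability_parallel_heterogenous_final2020.py | make_cluster
-- ===== SOURCE A (Python) =====
-- def make_cluster(json_obj, phaseI_nodes):
--     clusters_dictionnary={}
--     dictionnary_nodes_to_cluster_index={}
--     for i in range(0,len(phaseI_nodes)):
--         node_id=phaseI_nodes[i]
--         dictionnary_nodes_to_cluster_index[node_id]=set([i])
--         clusters_dictionnary[i]=set([node_id])
--
--     for a_reaction in json_obj["links"]:
--         source=a_reaction["source"]
--         target=a_reaction["target"]
--         if source in dictionnary_nodes_to_cluster_index.keys():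
--             all_cluster_index_list=list(dictionnary_nodes_to_cluster_index[source])
--             for a_cluster_index in all_cluster_index_list:
--                 clusters_dictionnary[a_cluster_index].add(target)
--                 if target in dictionnary_nodes_to_cluster_index:
--                     dictionnary_nodes_to_cluster_index[target].add(a_cluster_index)
--                 else:
--                     dictionnary_nodes_to_cluster_index[target]=set([a_cluster_index])
--     return clusters_dictionnary
-- ===== SOURCE B (Python) =====
-- def make_cluster(json_obj, phaseI_nodes):
--     # Phase 1: propagate only the node -> cluster-index membership through the links,
--     # keeping a log of (index-snapshot, target) pairs; the clusters dict is not
--     # touched during the pass and is rebuilt from the log at the end.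
--     membership = {}
--     for i, node in enumerate(phaseI_nodes):
--         membership[node] = {i}
--     additions = []
--     for reaction in json_obj["links"]:
--         source = reaction["source"]
--         target = reaction["target"]
--         if source in membership:
--             idxs = list(membership[source])
--             additions.append((idxs, target))
--             for idx in idxs:
--                 if target in membership:
--                     membership[target].add(idx)
--                 else:
--                     membership[target] = {idx}
--     # Phase 2: build each cluster from its seed node and the logged additions.
--     clusters = {}
--     for i, node in enumerate(phaseI_nodes):
--         members = {node}
--         for idxs, target in additions:
--             if i in idxs:
--                 members.add(target)
--         clusters[i] = members
--     return clusters
-- ===== Notes on version B (the rewrite author's own statement) =====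
-- stated objective: alternative
-- what changed: B removes the clusters dict from the link pass entirely: the pass only propagates the node-to-cluster-index membership and logs (index-snapshot, target) pairs, and every cluster is rebuilt afterwards from its seed node plus the log, instead of A's interleaved in-place updates of both dicts.
import Mathlib
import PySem

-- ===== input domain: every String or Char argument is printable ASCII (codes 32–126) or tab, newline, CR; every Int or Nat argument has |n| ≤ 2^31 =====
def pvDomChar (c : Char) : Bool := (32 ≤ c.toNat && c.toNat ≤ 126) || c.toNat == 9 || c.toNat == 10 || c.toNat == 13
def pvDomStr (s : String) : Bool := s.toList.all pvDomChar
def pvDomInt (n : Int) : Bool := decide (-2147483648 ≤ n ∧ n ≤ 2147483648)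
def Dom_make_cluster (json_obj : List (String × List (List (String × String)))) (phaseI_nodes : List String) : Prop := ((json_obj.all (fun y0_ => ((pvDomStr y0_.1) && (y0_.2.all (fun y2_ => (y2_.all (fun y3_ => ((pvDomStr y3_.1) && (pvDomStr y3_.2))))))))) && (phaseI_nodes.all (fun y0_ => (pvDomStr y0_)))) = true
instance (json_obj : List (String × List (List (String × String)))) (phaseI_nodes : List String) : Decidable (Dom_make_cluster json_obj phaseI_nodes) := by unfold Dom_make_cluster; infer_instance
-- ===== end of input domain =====

-- B defers all cluster construction to a second phase: the link pass only propagates the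
-- node→cluster-index membership and logs (index-snapshot, target) pairs, and each cluster
-- is rebuilt from its seed node plus the log (objective: alternative decomposition).

-- ===== PORT A =====
-- Literal port of A. Where the Python raises KeyError (missing "links" key, or a link
-- without "source"/"target"), the port reads a default value; Pre_make_cluster excludes
-- exactly those inputs. clusters_dictionnary[a_cluster_index] is always present (indices
-- come from membership values ⊆ range(len(phaseI_nodes))), so Dict.modify is exact there.
def make_cluster (json_obj : List (String × List (List (String × String)))) (phaseI_nodes : List String) : List (Int × List String) :=
  let init : PySem.Dict Int (PySem.Set String) × PySem.Dict String (PySem.Set Int) :=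
    (PySem.List.pyRange 0 (phaseI_nodes.length : Int)).foldl
      (fun st i =>
        let node_id := PySem.List.pyGetD phaseI_nodes i ""
        (st.1.insert i (PySem.Set.ofList [node_id]),
         st.2.insert node_id (PySem.Set.ofList [i])))
      (PySem.Dict.empty, PySem.Dict.empty)
  let final :=
    ((PySem.Dict.mk json_obj).getD "links" []).foldl
      (fun st a_reaction =>
        let source := (PySem.Dict.mk a_reaction).getD "source" ""
        let target := (PySem.Dict.mk a_reaction).getD "target" ""
        match st.2.get? source with
        | none => st
        | some all_cluster_index_list =>
          all_cluster_index_list.foldl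
            (fun st2 a_cluster_index =>
              (st2.1.modify a_cluster_index PySem.Set.empty (fun s => s.add target),
               match st2.2.get? target with
               | some _ => st2.2.modify target PySem.Set.empty (fun s => s.add a_cluster_index)
               | none => st2.2.insert target (PySem.Set.ofList [a_cluster_index])))
            st)
      init
  final.1.items

-- ===== PORT B =====
-- Literal port of Source B (same KeyError handling as port A, excluded by Pre_make_cluster).
def make_cluster_alt (json_obj : List (String × List (List (String × String)))) (phaseI_nodes : List String) : List (Int × List String) :=
  let membership : PySem.Dict String (PySem.Set Int) :=
    (PySem.List.enumerate phaseI_nodes).foldl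
      (fun m p => m.insert p.2 (PySem.Set.ofList [p.1])) PySem.Dict.empty
  let res :=
    ((PySem.Dict.mk json_obj).getD "links" []).foldl
      (fun (st : List (List Int × String) × PySem.Dict String (PySem.Set Int)) reaction =>
        let source := (PySem.Dict.mk reaction).getD "source" ""
        let target := (PySem.Dict.mk reaction).getD "target" ""
        match st.2.get? source with
        | none => st
        | some idxs =>
          (st.1 ++ [(idxs, target)],
           idxs.foldl
             (fun m idx =>
               match m.get? target with
               | some _ => m.modify target PySem.Set.empty (fun s => s.add idx)
               | none => m.insert target (PySem.Set.ofList [idx]))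
             st.2))
      ([], membership)
  ((PySem.List.enumerate phaseI_nodes).foldl
      (fun (d : PySem.Dict Int (PySem.Set String)) p =>
        d.insert p.1
          (res.1.foldl (fun members q => if q.1.contains p.1 then members.add q.2 else members)
            (PySem.Set.ofList [p.2])))
      PySem.Dict.empty).items

-- ===== PRECONDITION & SPEC =====
-- Pre_ excludes exactly the inputs where the Python raises KeyError: a json_obj without a
-- "links" key, or one whose "links" list contains a link without "source" or "target".
def Pre_make_cluster (json_obj : List (String × List (List (String × String)))) (phaseI_nodes : List String) : Prop :=
  (PySem.Dict.mk json_obj).contains "links" = true ∧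
  ∀ r ∈ (PySem.Dict.mk json_obj).getD "links" [],
    (PySem.Dict.mk r).contains "source" = true ∧ (PySem.Dict.mk r).contains "target" = true
instance (json_obj : List (String × List (List (String × String)))) (phaseI_nodes : List String) : Decidable (Pre_make_cluster json_obj phaseI_nodes) := by unfold Pre_make_cluster; infer_instance

def pvWitness_make_cluster : (List (String × List (List (String × String)))) × List String :=
  ([("links", [[("source", "a"), ("target", "b")]])], ["a", "c"])

def Spec_make_cluster (json_obj : List (String × List (List (String × String)))) (phaseI_nodes : List String) (out : List (Int × List String)) : Prop := out = make_cluster_alt json_obj phaseI_nodes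
instance (json_obj : List (String × List (List (String × String)))) (phaseI_nodes : List String) (out : List (Int × List String)) : Decidable (Spec_make_cluster json_obj phaseI_nodes out) := by unfold Spec_make_cluster; infer_instance

-- ===== CLAIM (what is proved, stated in full; the proofs are below) =====
def Claim_equal_make_cluster : Prop := ∀ (json_obj : List (String × List (List (String × String)))) (phaseI_nodes : List String), Dom_make_cluster json_obj phaseI_nodes → Pre_make_cluster json_obj phaseI_nodes → Spec_make_cluster json_obj phaseI_nodes (make_cluster json_obj phaseI_nodes)

-- ===== LEMMAS AND PROOFS =====

def pvMemF (t : String) (idxs : List Int) (m : PySem.Dict String (PySem.Set Int)) : PySem.Dict String (PySem.Set Int) :=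
  idxs.foldl
    (fun m i =>
      match m.get? t with
      | some _ => m.modify t PySem.Set.empty (fun s => s.add i)
      | none => m.insert t (PySem.Set.ofList [i]))
    m

def pvLogOf : List (List (String × String)) → PySem.Dict String (PySem.Set Int) → List (List Int × String) × PySem.Dict String (PySem.Set Int)
  | [], m => ([], m)
  | r :: rest, m =>
    match m.get? ((PySem.Dict.mk r).getD "source" "") with
    | none => pvLogOf rest m
    | some idxs =>
      let p := pvLogOf rest (pvMemF ((PySem.Dict.mk r).getD "target" "") idxs m)
      ((idxs, (PySem.Dict.mk r).getD "target" "") :: p.1, p.2)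

def pvStepC (idxs : List Int) (t : String) (C : PySem.Dict Int (PySem.Set String)) : PySem.Dict Int (PySem.Set String) :=
  idxs.foldl (fun c i => c.modify i PySem.Set.empty (fun s => s.add t)) C

def pvApplyLog (L : List (List Int × String)) (C : PySem.Dict Int (PySem.Set String)) : PySem.Dict Int (PySem.Set String) :=
  L.foldl (fun c q => pvStepC q.1 q.2 c) C

lemma pvInnerA (t : String) (idxs : List Int) (C : PySem.Dict Int (PySem.Set String)) (m : PySem.Dict String (PySem.Set Int)) :
    idxs.foldl
      (fun st2 i =>
        (st2.1.modify i PySem.Set.empty (fun s => s.add t),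
         match st2.2.get? t with
         | some _ => st2.2.modify t PySem.Set.empty (fun s => s.add i)
         | none => st2.2.insert t (PySem.Set.ofList [i])))
      (C, m)
    = (pvStepC idxs t C, pvMemF t idxs m) := by
  induction idxs generalizing C m with
  | nil => rfl
  | cons j rest ih =>
    simp only [List.foldl_cons, pvStepC, pvMemF] at *
    exact ih _ _

lemma pvA_fold (links : List (List (String × String))) (C : PySem.Dict Int (PySem.Set String)) (m : PySem.Dict String (PySem.Set Int)) :
    links.foldl
      (fun (st : PySem.Dict Int (PySem.Set String) × PySem.Dict String (PySem.Set Int)) a_reaction =>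
        match st.2.get? ((PySem.Dict.mk a_reaction).getD "source" "") with
        | none => st
        | some idxs =>
          idxs.foldl
            (fun st2 i =>
              (st2.1.modify i PySem.Set.empty (fun s => s.add ((PySem.Dict.mk a_reaction).getD "target" "")),
               match st2.2.get? ((PySem.Dict.mk a_reaction).getD "target" "") with
               | some _ => st2.2.modify ((PySem.Dict.mk a_reaction).getD "target" "") PySem.Set.empty (fun s => s.add i)
               | none => st2.2.insert ((PySem.Dict.mk a_reaction).getD "target" "") (PySem.Set.ofList [i])))
            st)
      (C, m)
    = (pvApplyLog (pvLogOf links m).1 C, (pvLogOf links m).2) := by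
  induction links generalizing C m with
  | nil => simp [pvLogOf, pvApplyLog]
  | cons r rest ih =>
    simp only [List.foldl_cons]
    cases h : m.get? ((PySem.Dict.mk r).getD "source" "") with
    | none => simp only [pvLogOf, h]; exact ih C m
    | some idxs =>
      simp only [pvLogOf, h]
      rw [pvInnerA]
      rw [ih]
      simp only [pvApplyLog, List.foldl_cons]

def pvGood (P : Int → Prop) (m : PySem.Dict String (PySem.Set Int)) : Prop :=
  ∀ t s, m.get? t = some s → ∀ i ∈ s, P i

lemma pvMemF_good (P : Int → Prop) (t : String) (idxs : List Int) (m : PySem.Dict String (PySem.Set Int))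
    (hm : pvGood P m) (hi : ∀ i ∈ idxs, P i) : pvGood P (pvMemF t idxs m) := by
  induction idxs generalizing m with
  | nil => exact hm
  | cons j rest ih =>
    simp only [pvMemF, List.foldl_cons] at *
    cases h : m.get? t with
    | none =>
      refine ih _ ?_ (fun i hi' => hi i (List.mem_cons_of_mem _ hi'))
      intro t' s' hget i' hmem
      rw [PySem.Dict.get?_insert] at hget
      split at hget
      · cases hget
        rw [PySem.Set.mem_ofList] at hmem
        simp at hmem
        exact hmem ▸ hi j (List.mem_cons_self)
      · exact hm t' s' hget i' hmem
    | some s0 =>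
      simp only [PySem.Dict.modify]
      refine ih _ ?_ (fun i hi' => hi i (List.mem_cons_of_mem _ hi'))
      intro t' s' hget i' hmem
      rw [PySem.Dict.get?_insert] at hget
      split at hget
      · cases hget
        rw [PySem.Set.mem_add] at hmem
        rcases hmem with hmem | rfl
        · rw [PySem.Dict.getD_eq_get?_getD, h] at hmem
          exact hm t s0 h i' hmem
        · exact hi _ (List.mem_cons_self)
      · exact hm t' s' hget i' hmem

lemma pvLogOf_closure (P : Int → Prop) (links : List (List (String × String))) (m : PySem.Dict String (PySem.Set Int))
    (hm : pvGood P m) : ∀ q ∈ (pvLogOf links m).1, ∀ i ∈ q.1, P i := by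
  induction links generalizing m with
  | nil => simp [pvLogOf]
  | cons r rest ih =>
    cases h : m.get? ((PySem.Dict.mk r).getD "source" "") with
    | none =>
      simp only [pvLogOf, h]
      exact ih m hm
    | some idxs =>
      simp only [pvLogOf, h]
      intro q hq
      rcases List.mem_cons.mp hq with rfl | hq'
      · exact hm _ idxs h
      · exact ih _ (pvMemF_good P _ idxs m hm (hm _ idxs h)) q hq'

lemma pvContains_of_mem (base : List (Int × PySem.Set String)) (j : Int) (h : j ∈ base.map Prod.fst) :
    (PySem.Dict.mk base).contains j = true := by
  simp only [PySem.Dict.contains, List.any_eq_true]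
  rcases List.mem_map.mp h with ⟨p, hp, rfl⟩
  exact ⟨p, hp, by simp⟩


lemma pvStepC_mk (idxs : List Int) (t : String) (base : List (Int × PySem.Set String))
    (hn : (base.map Prod.fst).Nodup) (hk : ∀ i ∈ idxs, i ∈ base.map Prod.fst) :
    pvStepC idxs t ⟨base⟩ = ⟨base.map (fun p => if idxs.contains p.1 then (p.1, p.2.add t) else p)⟩ := by
  induction idxs generalizing base with
  | nil => simp [pvStepC]
  | cons j rest ih =>
    have hc := pvContains_of_mem base j (hk j List.mem_cons_self)
    have hstep : (PySem.Dict.mk base).modify j PySem.Set.empty (fun s => s.add t)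
        = ⟨base.map (fun p => if p.1 = j then (p.1, p.2.add t) else p)⟩ := by
      simp only [PySem.Dict.modify, PySem.Dict.insert, hc, if_true]
      congr 1
      apply List.map_congr_left
      intro p hp
      by_cases hpj : p.1 = j
      · have hitem : (j, p.2) ∈ (PySem.Dict.mk base).items := by
          simpa [← hpj] using hp
        have hkeys : (PySem.Dict.mk base).keys.Nodup := by
          simpa [PySem.Dict.keys] using hn
        rw [PySem.Dict.getD_of_mem_items _ hitem hkeys]
        simp [hpj]
      · simp [hpj]
    have hfst : (base.map (fun p => if p.1 = j then (p.1, p.2.add t) else p)).map Prod.fst = base.map Prod.fst := by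
      rw [List.map_map]
      apply List.map_congr_left
      intro p hp
      by_cases hpj : p.1 = j <;> simp [hpj]
    simp only [pvStepC, List.foldl_cons] at *
    rw [hstep, ih _ (by rw [hfst]; exact hn) (by rw [hfst]; intro i hi; exact hk i (List.mem_cons_of_mem _ hi))]
    congr 1
    rw [List.map_map]
    apply List.map_congr_left
    intro p hp
    by_cases hpj : p.1 = j <;> by_cases hmem : p.1 ∈ rest <;>
      simp [hpj, hmem, PySem.Set.add_of_mem (PySem.Set.mem_add _ _ _ |>.mpr (Or.inr rfl))]

def pvReplay (L : List (List Int × String)) (i : Int) (s : PySem.Set String) : PySem.Set String :=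
  L.foldl (fun s q => if q.1.contains i then s.add q.2 else s) s

lemma pvApplyLog_items (L : List (List Int × String)) (base : List (Int × PySem.Set String))
    (hn : (base.map Prod.fst).Nodup) (hk : ∀ q ∈ L, ∀ i ∈ q.1, i ∈ base.map Prod.fst) :
    (pvApplyLog L ⟨base⟩).items = base.map (fun p => (p.1, pvReplay L p.1 p.2)) := by
  induction L generalizing base with
  | nil => simp [pvApplyLog, pvReplay]
  | cons q L ih =>
    rw [show pvApplyLog (q :: L) ⟨base⟩ = pvApplyLog L (pvStepC q.1 q.2 ⟨base⟩) from rfl]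
    rw [pvStepC_mk q.1 q.2 base hn (hk q List.mem_cons_self)]
    have hfst : (base.map (fun p => if q.1.contains p.1 then (p.1, p.2.add q.2) else p)).map Prod.fst = base.map Prod.fst := by
      rw [List.map_map]
      apply List.map_congr_left
      intro p hp
      by_cases hc : p.1 ∈ q.1 <;> simp [hc]
    rw [ih _ (by rw [hfst]; exact hn) (by rw [hfst]; intro q' hq' i hi; exact hk q' (List.mem_cons_of_mem _ hq') i hi)]
    rw [List.map_map]
    apply List.map_congr_left
    intro p hp
    by_cases hc : p.1 ∈ q.1 <;>
      simp [Function.comp, hc, pvReplay]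

lemma pvB_fold (links : List (List (String × String))) (log : List (List Int × String)) (m : PySem.Dict String (PySem.Set Int)) :
    links.foldl
      (fun (st : List (List Int × String) × PySem.Dict String (PySem.Set Int)) reaction =>
        match st.2.get? ((PySem.Dict.mk reaction).getD "source" "") with
        | none => st
        | some idxs =>
          (st.1 ++ [(idxs, (PySem.Dict.mk reaction).getD "target" "")],
           idxs.foldl
             (fun m idx =>
               match m.get? ((PySem.Dict.mk reaction).getD "target" "") with
               | some _ => m.modify ((PySem.Dict.mk reaction).getD "target" "") PySem.Set.empty (fun s => s.add idx)
               | none => m.insert ((PySem.Dict.mk reaction).getD "target" "") (PySem.Set.ofList [idx]))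
             st.2))
      (log, m)
    = (log ++ (pvLogOf links m).1, (pvLogOf links m).2) := by
  induction links generalizing log m with
  | nil => simp [pvLogOf]
  | cons r rest ih =>
    simp only [List.foldl_cons]
    cases h : m.get? ((PySem.Dict.mk r).getD "source" "") with
    | none => simp only [pvLogOf, h]; exact ih log m
    | some idxs =>
      simp only [pvLogOf, h]
      rw [show (idxs.foldl
             (fun m idx =>
               match m.get? ((PySem.Dict.mk r).getD "target" "") with
               | some _ => m.modify ((PySem.Dict.mk r).getD "target" "") PySem.Set.empty (fun s => s.add idx)
               | none => m.insert ((PySem.Dict.mk r).getD "target" "") (PySem.Set.ofList [idx]))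
             m) = pvMemF ((PySem.Dict.mk r).getD "target" "") idxs m from rfl]
      rw [ih]
      simp

lemma pvInit_fold (xs : List String) (l : List Int) (C : PySem.Dict Int (PySem.Set String)) (m : PySem.Dict String (PySem.Set Int)) :
    l.foldl
      (fun st i =>
        (st.1.insert i (PySem.Set.ofList [PySem.List.pyGetD xs i ""]),
         st.2.insert (PySem.List.pyGetD xs i "") (PySem.Set.ofList [i])))
      (C, m)
    = (l.foldl (fun c i => c.insert i (PySem.Set.ofList [PySem.List.pyGetD xs i ""])) C,
       l.foldl (fun mm i => mm.insert (PySem.List.pyGetD xs i "") (PySem.Set.ofList [i])) m) := by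
  induction l generalizing C m with
  | nil => rfl
  | cons j rest ih => simp only [List.foldl_cons]; exact ih _ _

lemma pvInitMem_good (P : Int → Prop) (xs : List String) (l : List Int) (m : PySem.Dict String (PySem.Set Int))
    (hm : pvGood P m) (hl : ∀ i ∈ l, P i) :
    pvGood P (l.foldl (fun mm i => mm.insert (PySem.List.pyGetD xs i "") (PySem.Set.ofList [i])) m) := by
  induction l generalizing m with
  | nil => exact hm
  | cons j rest ih =>
    simp only [List.foldl_cons]
    refine ih _ ?_ (fun i hi => hl i (List.mem_cons_of_mem _ hi))
    intro t' s' hget i' hmem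
    rw [PySem.Dict.get?_insert] at hget
    split at hget
    · cases hget
      rw [PySem.Set.mem_ofList] at hmem
      simp at hmem
      exact hmem ▸ hl j List.mem_cons_self
    · exact hm t' s' hget i' hmem

lemma pvGood_empty (P : Int → Prop) : pvGood P PySem.Dict.empty := by
  intro t s h
  simp [PySem.Dict.get?, PySem.Dict.empty] at h

lemma pvPyRange_nodup (xs : List String) : (PySem.List.pyRange 0 (xs.length : Int)).Nodup := by
  have h := PySem.List.map_fst_enumerate xs 0
  have hp := PySem.List.pairwise_lt_enumerate xs 0
  have : (PySem.List.pyRange 0 (0 + (xs.length : Int))).Pairwise (· < ·) := by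
    rw [← h]
    exact (List.pairwise_map).mpr hp
  simpa using this.imp ne_of_lt


lemma pvMain_eq (json_obj : List (String × List (List (String × String)))) (xs : List String) :
    make_cluster json_obj xs = make_cluster_alt json_obj xs := by
  simp only [make_cluster, make_cluster_alt]
  rw [pvInit_fold]
  rw [pvA_fold]
  set L := (pvLogOf ((PySem.Dict.mk json_obj).getD "links" [])
      ((PySem.List.pyRange 0 (xs.length : Int)).foldl
        (fun mm i => mm.insert (PySem.List.pyGetD xs i "") (PySem.Set.ofList [i])) PySem.Dict.empty)).1 with hL
  -- initial clusters dict
  have hC0items : ((PySem.List.pyRange 0 (xs.length : Int)).foldl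
      (fun c i => c.insert i (PySem.Set.ofList [PySem.List.pyGetD xs i ""])) PySem.Dict.empty).items
      = (PySem.List.pyRange 0 (xs.length : Int)).map (fun i => (i, PySem.Set.ofList [PySem.List.pyGetD xs i ""])) := by
    rw [PySem.Dict.items_foldl_insert_fresh _ (fun i => i) _ _ (fun a _ => PySem.Dict.contains_empty a)
      (by simpa using pvPyRange_nodup xs)]
    rfl
  have hbasefst : (((PySem.List.pyRange 0 (xs.length : Int)).map
      (fun i => (i, PySem.Set.ofList [PySem.List.pyGetD xs i ""]))).map Prod.fst)
      = PySem.List.pyRange 0 (xs.length : Int) := by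
    rw [List.map_map, show (Prod.fst ∘ fun i : Int => (i, PySem.Set.ofList [PySem.List.pyGetD xs i ""])) = id from rfl, List.map_id]
  have hgood : pvGood (· ∈ PySem.List.pyRange 0 (xs.length : Int))
      ((PySem.List.pyRange 0 (xs.length : Int)).foldl
        (fun mm i => mm.insert (PySem.List.pyGetD xs i "") (PySem.Set.ofList [i])) PySem.Dict.empty) :=
    pvInitMem_good _ xs _ _ (pvGood_empty _) (fun i hi => hi)
  rw [show ((PySem.List.pyRange 0 (xs.length : Int)).foldl
      (fun c i => c.insert i (PySem.Set.ofList [PySem.List.pyGetD xs i ""])) PySem.Dict.empty)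
      = (⟨(PySem.List.pyRange 0 (xs.length : Int)).map (fun i => (i, PySem.Set.ofList [PySem.List.pyGetD xs i ""]))⟩ :
        PySem.Dict Int (PySem.Set String)) from PySem.Dict.ext hC0items]
  rw [pvApplyLog_items L _ (by rw [hbasefst]; exact pvPyRange_nodup xs)
      (by rw [hbasefst]; exact pvLogOf_closure _ _ _ hgood)]
  have hmemb : (PySem.List.enumerate xs).foldl
      (fun (m : PySem.Dict String (PySem.Set Int)) p => m.insert p.2 (PySem.Set.ofList [p.1])) PySem.Dict.empty
      = (PySem.List.pyRange 0 (xs.length : Int)).foldl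
        (fun mm i => mm.insert (PySem.List.pyGetD xs i "") (PySem.Set.ofList [i])) PySem.Dict.empty := by
    rw [PySem.List.enumerate_eq_map_pyRange xs "", List.foldl_map]
    rfl
  rw [hmemb]
  rw [pvB_fold]
  simp only [List.nil_append]
  rw [PySem.Dict.items_foldl_insert_fresh (PySem.List.enumerate xs) Prod.fst _ _
      (fun a _ => PySem.Dict.contains_empty a.1)
      (by rw [PySem.List.map_fst_enumerate]; simpa using pvPyRange_nodup xs)]
  rw [List.map_map]
  rw [PySem.List.enumerate_eq_map_pyRange xs "", List.map_map]
  rfl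

-- ===== VERDICT (by name: the statement is the Claim_ definition above) =====
theorem make_cluster_spec : Claim_equal_make_cluster := by
  intro json_obj phaseI_nodes _ _
  unfold Spec_make_cluster
  exact pvMain_eq json_obj phaseI_nodes
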